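-- pv_equiv track=rewrite | github.com/sjakati98/MapRecoFiles | original_annotation_script.py | check_box_in_crop
-- ===== SOURCE A (Python) =====
-- def check_box_in_crop(box_coordinates, crop_x, crop_y, crop_width=1280, crop_height=720):
-- 	"""
-- 		Inputs:
-- 		- box_coordinates: List[(Int, Int)]; the 4 coordinate tuples
-- 		- crop_x: Int; top-left x coordinate of the crop
-- 		- crop_y: Int; top-left y coordinate of the crop
-- 		- crop_width: Int; width of the crop window
-- 		- crop_height: Int; height of the crop window
-- 		Outputs:
-- 		- relative_coordinates: List[(Int, Int)]; returns 4 coordinate tuples of the relative_coordinates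
-- 			- **returns None if the original box_coordinates are not completely within the crop**
-- 	"""
-- 	crop_x_max = crop_x + crop_width
-- 	crop_y_max = crop_y + crop_height
--
-- 	relative_coordinates = []
--
-- 	for i, coordinate_pair in enumerate(box_coordinates):
-- 		coordinate_x = coordinate_pair[0]
-- 		coordinate_y = coordinate_pair[1]
-- 		if crop_x <= coordinate_x <= crop_x_max and crop_y <= coordinate_y <= crop_y_max:
-- 			relative_x = int(coordinate_x - crop_x)
-- 			relative_y = int(coordinate_y - crop_y)
-- 			relative_coordinates.append((relative_x, relative_y))
-- 		else:
-- 			return None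
--
-- 	return relative_coordinates
-- ===== SOURCE B (Python) =====
-- def check_box_in_crop(box_coordinates, crop_x, crop_y, crop_width=1280, crop_height=720):
--     crop_x_max = crop_x + crop_width
--     crop_y_max = crop_y + crop_height
--     if not all(crop_x <= p[0] <= crop_x_max and crop_y <= p[1] <= crop_y_max
--                for p in box_coordinates):
--         return None
--     return [(int(p[0] - crop_x), int(p[1] - crop_y)) for p in box_coordinates]
-- ===== Notes on version B (the rewrite author's own statement) =====
-- stated objective: simpler
-- what changed: Replaces the single fail-fast loop that interleaves validation and accumulation with two passes: an all() containment check followed by a comprehension computing the relative coordinates.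
import Mathlib
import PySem

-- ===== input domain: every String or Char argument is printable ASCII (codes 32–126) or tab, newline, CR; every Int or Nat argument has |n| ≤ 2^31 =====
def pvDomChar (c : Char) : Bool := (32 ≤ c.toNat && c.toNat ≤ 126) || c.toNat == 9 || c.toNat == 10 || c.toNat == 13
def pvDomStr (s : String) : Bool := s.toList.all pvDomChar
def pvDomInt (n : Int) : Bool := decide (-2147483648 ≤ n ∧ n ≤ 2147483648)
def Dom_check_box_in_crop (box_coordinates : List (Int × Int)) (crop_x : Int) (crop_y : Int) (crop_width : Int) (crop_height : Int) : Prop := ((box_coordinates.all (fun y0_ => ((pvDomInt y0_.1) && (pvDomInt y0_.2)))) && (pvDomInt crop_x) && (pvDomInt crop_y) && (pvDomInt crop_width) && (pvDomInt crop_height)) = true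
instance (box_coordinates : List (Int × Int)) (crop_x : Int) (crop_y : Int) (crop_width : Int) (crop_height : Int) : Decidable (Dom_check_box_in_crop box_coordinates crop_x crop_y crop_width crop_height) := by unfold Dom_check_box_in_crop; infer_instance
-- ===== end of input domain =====

-- B splits A's single fail-fast loop into an all() containment check followed by a
-- comprehension producing the relative coordinates (objective: simpler).

-- ===== PORT A =====
-- A's loop: appends the relative pair for each in-bounds point, returns None at the
-- first out-of-bounds point.
def checkLoopA (crop_x crop_y crop_x_max crop_y_max : Int) :
    List (Int × Int) → List (Int × Int) → Option (List (Int × Int))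
  | [], acc => some acc
  | p :: rest, acc =>
    if crop_x ≤ p.1 ∧ p.1 ≤ crop_x_max ∧ crop_y ≤ p.2 ∧ p.2 ≤ crop_y_max then
      checkLoopA crop_x crop_y crop_x_max crop_y_max rest
        (acc ++ [(p.1 - crop_x, p.2 - crop_y)])
    else
      none

def check_box_in_crop (box_coordinates : List (Int × Int)) (crop_x : Int) (crop_y : Int) (crop_width : Int) (crop_height : Int) : Option (List (Int × Int)) :=
  let crop_x_max := crop_x + crop_width
  let crop_y_max := crop_y + crop_height
  checkLoopA crop_x crop_y crop_x_max crop_y_max box_coordinates []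

-- ===== PORT B =====
def check_box_in_crop_alt (box_coordinates : List (Int × Int)) (crop_x : Int) (crop_y : Int) (crop_width : Int) (crop_height : Int) : Option (List (Int × Int)) :=
  let crop_x_max := crop_x + crop_width
  let crop_y_max := crop_y + crop_height
  if !(box_coordinates.all (fun p =>
        decide (crop_x ≤ p.1 ∧ p.1 ≤ crop_x_max ∧ crop_y ≤ p.2 ∧ p.2 ≤ crop_y_max))) then
    none
  else
    some (box_coordinates.map (fun p => (p.1 - crop_x, p.2 - crop_y)))

-- ===== PRECONDITION & SPEC =====
def Spec_check_box_in_crop (box_coordinates : List (Int × Int)) (crop_x : Int) (crop_y : Int) (crop_width : Int) (crop_height : Int) (out : Option (List (Int × Int))) : Prop := out = check_box_in_crop_alt box_coordinates crop_x crop_y crop_width crop_height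
instance (box_coordinates : List (Int × Int)) (crop_x : Int) (crop_y : Int) (crop_width : Int) (crop_height : Int) (out : Option (List (Int × Int))) : Decidable (Spec_check_box_in_crop box_coordinates crop_x crop_y crop_width crop_height out) := by unfold Spec_check_box_in_crop; infer_instance

-- ===== CLAIM (what is proved, stated in full; the proofs are below) =====
def Claim_equal_check_box_in_crop : Prop := ∀ (box_coordinates : List (Int × Int)) (crop_x : Int) (crop_y : Int) (crop_width : Int) (crop_height : Int), Dom_check_box_in_crop box_coordinates crop_x crop_y crop_width crop_height → Spec_check_box_in_crop box_coordinates crop_x crop_y crop_width crop_height (check_box_in_crop box_coordinates crop_x crop_y crop_width crop_height)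

-- ===== LEMMAS AND PROOFS =====

-- A's loop equals "all in bounds ⟹ accumulated prefix ++ mapped rest, else none".
theorem checkLoopA_eq (cx cy cxm cym : Int) (l acc : List (Int × Int)) :
    checkLoopA cx cy cxm cym l acc =
      if l.all (fun p => decide (cx ≤ p.1 ∧ p.1 ≤ cxm ∧ cy ≤ p.2 ∧ p.2 ≤ cym)) then
        some (acc ++ l.map (fun p => (p.1 - cx, p.2 - cy)))
      else none := by
  induction l generalizing acc with
  | nil => simp [checkLoopA]
  | cons p rest ih =>
    simp only [checkLoopA, List.all_cons, List.map_cons]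
    by_cases h : cx ≤ p.1 ∧ p.1 ≤ cxm ∧ cy ≤ p.2 ∧ p.2 ≤ cym
    · simp only [if_pos h, ih, decide_eq_true h, Bool.true_and, List.append_assoc, List.singleton_append]
    · simp [h]

-- ===== VERDICT (by name: the statement is the Claim_ definition above) =====
theorem check_box_in_crop_spec : Claim_equal_check_box_in_crop := by
  intro bc cx cy cw ch _
  unfold Spec_check_box_in_crop check_box_in_crop check_box_in_crop_alt
  simp only [checkLoopA_eq, List.nil_append]
  cases bc.all (fun p => decide (cx ≤ p.1 ∧ p.1 ≤ cx + cw ∧ cy ≤ p.2 ∧ p.2 ≤ cy + ch)) <;>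
    simp
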